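-- pv_equiv track=rewrite | github.com/vishalsingh8989/karumanchi_algo_solutions_python | Chapter 4 stacks/finding_span.py | findspanopt
-- ===== SOURCE A (Python) =====
-- def findspanopt(entries = []):
--     """ Time complexity = O(n)
--     """
--     if len(entries) == 0:
--         return []
--
--     span = []
--     for idx , num in enumerate(entries):
--         if idx-1 >=0 and entries[idx-1] < entries[idx]:
--             span.insert(idx,span[idx-1] + 1)
--         if idx-1 < 0  or entries[idx-1]>= entries[idx]:
--             span.insert(idx, 1)
--     return span
-- ===== SOURCE B (Python) =====
-- def findspanopt(entries=[]):
--     n = len(entries)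
--     # pass 1: indices where a maximal strictly-increasing run starts
--     starts = [i for i in range(n) if i == 0 or entries[i - 1] >= entries[i]]
--     bounds = starts + [n]
--     # pass 2: each run [s, e) contributes the literal sequence 1, 2, ..., e-s
--     out = []
--     for s, e in zip(bounds, bounds[1:]):
--         out.extend(range(1, e - s + 1))
--     return out
-- ===== Notes on version B (the rewrite author's own statement) =====
-- stated objective: alternative
-- what changed: Replaces A's single pass that maintains the running recurrence span[i]=span[i-1]+1 via inserts into the partially-built list with a run-segmentation algorithm: first collect the start indices of the maximal strictly-increasing runs, then emit the literal range 1..length for each run; no running counter or back-indexing into the output exists in B.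
import Mathlib
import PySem

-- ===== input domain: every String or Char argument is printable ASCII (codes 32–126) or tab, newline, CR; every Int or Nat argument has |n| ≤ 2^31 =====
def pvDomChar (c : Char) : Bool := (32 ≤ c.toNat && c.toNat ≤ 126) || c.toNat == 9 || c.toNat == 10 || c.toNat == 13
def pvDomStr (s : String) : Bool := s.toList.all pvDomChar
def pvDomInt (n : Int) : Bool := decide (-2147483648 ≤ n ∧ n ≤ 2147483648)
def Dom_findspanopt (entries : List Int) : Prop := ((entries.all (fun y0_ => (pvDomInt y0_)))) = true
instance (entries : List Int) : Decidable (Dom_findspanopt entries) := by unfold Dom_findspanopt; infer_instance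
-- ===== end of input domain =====

-- B replaces A's running-recurrence single pass (span[i]=span[i-1]+1 via inserts) with a
-- run-segmentation algorithm: collect the start indices of the maximal strictly-increasing
-- runs, then emit the literal range 1..length for each run; same O(n) cost.


-- ===== PORT A =====
-- loop body of A's for-loop (the two guarded inserts, in source order)
def findspanStep (entries : List Int) (span : List Int) (p : Int × Int) : List Int :=
  let idx := p.1
  let span1 :=
    if idx - 1 ≥ 0 ∧ PySem.List.pyGetD entries (idx - 1) 0 < PySem.List.pyGetD entries idx 0 then
      PySem.List.insert span idx (PySem.List.pyGetD span (idx - 1) 0 + 1)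
    else span
  if idx - 1 < 0 ∨ PySem.List.pyGetD entries (idx - 1) 0 ≥ PySem.List.pyGetD entries idx 0 then
    PySem.List.insert span1 idx 1
  else span1

def findspanopt (entries : List Int) : List Int :=
  if entries.length == 0 then []
  else (PySem.List.enumerate entries 0).foldl (findspanStep entries) []

-- ===== PORT B =====
-- the run-start test:  i == 0 or entries[i-1] >= entries[i]
def isStart (entries : List Int) (i : Int) : Bool :=
  i == 0 || decide (PySem.List.pyGetD entries (i - 1) 0 ≥ PySem.List.pyGetD entries i 0)

-- pass 2: 'for s, e in zip(bounds, bounds[1:]): out.extend(range(1, e - s + 1))'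
-- (recursion over the adjacent pairs of the bounds list, concatenating the ranges)
def segcat : List Int → List Int
  | s :: e :: rest => PySem.List.pyRange 1 (e - s + 1) 1 ++ segcat (e :: rest)
  | _ => []

def findspanopt_alt (entries : List Int) : List Int :=
  let n : Int := entries.length
  let starts := (PySem.List.pyRange 0 n 1).filter (isStart entries)
  segcat (starts ++ [n])

-- ===== PRECONDITION & SPEC =====
def Spec_findspanopt (entries : List Int) (out : List Int) : Prop := out = findspanopt_alt entries
instance (entries : List Int) (out : List Int) : Decidable (Spec_findspanopt entries out) := by unfold Spec_findspanopt; infer_instance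

-- ===== CLAIM (what is proved, stated in full; the proofs are below) =====
def Claim_equal_findspanopt : Prop := ∀ (entries : List Int), Dom_findspanopt entries → Spec_findspanopt entries (findspanopt entries)

-- ===== LEMMAS AND PROOFS =====

-- common reference: spans of `rest`, given previous value `prev` and its running count `run`
def spanGo : Int → Int → List Int → List Int
  | _, _, [] => []
  | prev, run, x :: xs =>
    let r := if prev < x then run + 1 else 1
    r :: spanGo x r xs

-- reference form of B's run-start list, starting at index i with previous value prev
def resetIdxs : Int → Int → List Int → List Int
  | _, _, [] => []
  | prev, i, y :: ys => if prev < y then resetIdxs y (i + 1) ys else i :: resetIdxs y (i + 1) ys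

lemma getD_append_last (pre rest : List Int) (prev : Int) (h : pre.getLast? = some prev) :
    (pre ++ rest).getD (pre.length - 1) 0 = prev := by
  have hne : pre ≠ [] := by rintro rfl; simp at h
  have hlen : 0 < pre.length := List.length_pos_iff.mpr hne
  have h1 : pre.length - 1 < pre.length := by omega
  have hlast : pre[pre.length - 1]'h1 = prev := by
    rw [List.getLast?_eq_getElem?] at h
    simpa [List.getElem?_eq_getElem h1] using h
  rw [List.getD_eq_getElem?_getD, List.getElem?_append_left h1, List.getElem?_eq_getElem h1]
  simpa using hlast

lemma getD_append_length (pre : List Int) (x : Int) (rest : List Int) :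
    (pre ++ x :: rest).getD pre.length 0 = x := by
  rw [List.getD_eq_getElem?_getD, List.getElem?_append_right (Nat.le_refl _)]
  simp

lemma A_go (entries : List Int) :
    ∀ (rest pre span : List Int) (prev run : Int),
      entries = pre ++ rest → span.length = pre.length →
      pre.getLast? = some prev → span.getLast? = some run →
      (PySem.List.enumerate rest (pre.length : Int)).foldl (findspanStep entries) span
        = span ++ spanGo prev run rest := by
  intro rest
  induction rest with
  | nil => intro pre span prev run _ _ _ _; simp [spanGo]
  | cons x xs ih =>
    intro pre span prev run hE hL hP hR
    have hpre : pre ≠ [] := by rintro rfl; simp at hP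
    have hn : 0 < pre.length := List.length_pos_iff.mpr hpre
    have hcast : (pre.length : Int) - 1 = ((pre.length - 1 : Nat) : Int) := by omega
    have hprev : PySem.List.pyGetD entries ((pre.length : Int) - 1) 0 = prev := by
      rw [hcast, PySem.List.pyGetD_natCast, hE]
      exact getD_append_last pre _ prev hP
    have hx : PySem.List.pyGetD entries (pre.length : Int) 0 = x := by
      rw [PySem.List.pyGetD_natCast, hE]; exact getD_append_length pre x xs
    have hrun : PySem.List.pyGetD span ((pre.length : Int) - 1) 0 = run := by
      rw [hcast, ← hL, PySem.List.pyGetD_natCast]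
      simpa using getD_append_last span [] run hR
    have hins : ∀ v : Int, PySem.List.insert span (pre.length : Int) v = span ++ [v] := by
      intro v
      rw [← hL, PySem.List.insert_natCast span span.length v (Nat.le_refl _)]
      simp
    have hstep : findspanStep entries span ((pre.length : Int), x)
        = span ++ [if prev < x then run + 1 else 1] := by
      unfold findspanStep
      dsimp only
      simp only [hprev, hx, hrun]
      by_cases hc : prev < x
      · rw [if_neg (not_or.mpr ⟨by omega, by omega⟩), if_pos ⟨by omega, hc⟩, hins]
        rw [if_pos hc]
      · rw [if_pos (Or.inr (by omega)), if_neg (fun hh => hc hh.2), hins]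
        rw [if_neg hc]
    rw [PySem.List.enumerate_cons, List.foldl_cons, hstep]
    set r : Int := if prev < x then run + 1 else 1 with hr
    have : ((pre.length : Int) + 1) = (((pre ++ [x]).length : Nat) : Int) := by
      simp
    rw [this, ih (pre ++ [x]) (span ++ [r]) x r (by simp [hE]) (by simp [hL])
        (by simp) (by simp)]
    simp [spanGo, ← hr]

lemma A_eq (x : Int) (xs : List Int) :
    findspanopt (x :: xs) = 1 :: spanGo x 1 xs := by
  unfold findspanopt
  rw [if_neg (by simp)]
  rw [PySem.List.enumerate_cons, List.foldl_cons]
  have h0 : findspanStep (x :: xs) [] (0, x) = [1] := by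
    unfold findspanStep
    dsimp only
    rw [if_pos (Or.inl (by omega)), if_neg (fun hh => absurd hh.1 (by omega))]
    simp [PySem.List.insert_zero]
  rw [h0]
  have : (0 : Int) + 1 = (([x].length : Nat) : Int) := by simp
  rw [this, A_go (x :: xs) xs [x] [1] x 1 rfl rfl (by simp) (by simp)]
  simp

-- B's filtered range equals the reference run-start list
lemma starts_go (entries : List Int) :
    ∀ (rest pre : List Int) (prev : Int),
      entries = pre ++ rest → pre.getLast? = some prev →
      (PySem.List.pyRange (pre.length : Int) (entries.length : Int) 1).filter (isStart entries)
        = resetIdxs prev (pre.length : Int) rest := by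
  intro rest
  induction rest with
  | nil =>
    intro pre prev hE _
    have : entries.length = pre.length := by simp [hE]
    rw [this, PySem.List.pyRange_one_eq_nil (le_refl _)]
    simp [resetIdxs]
  | cons x xs ih =>
    intro pre prev hE hP
    have hpre : pre ≠ [] := by rintro rfl; simp at hP
    have hn : 0 < pre.length := List.length_pos_iff.mpr hpre
    have hlt : (pre.length : Int) < (entries.length : Int) := by
      have := congrArg List.length hE
      simp at this
      omega
    have hcast : (pre.length : Int) - 1 = ((pre.length - 1 : Nat) : Int) := by omega
    have hflag : isStart entries (pre.length : Int) = decide (prev ≥ x) := by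
      unfold isStart
      rw [hcast, PySem.List.pyGetD_natCast, PySem.List.pyGetD_natCast, hE,
        getD_append_last pre _ prev hP, getD_append_length pre x xs]
      have h0 : (((pre.length : Nat) : Int) == 0) = false := by
        simp
        omega
      rw [h0, Bool.false_or]
    rw [PySem.List.pyRange_one_cons hlt, List.filter_cons, hflag]
    have hc1 : ((pre.length : Int) + 1) = (((pre ++ [x]).length : Nat) : Int) := by simp
    have hrec := ih (pre ++ [x]) x (by simp [hE]) (by simp)
    rw [hc1] at *
    by_cases hc : prev < x
    · rw [if_neg (by simpa using by omega : ¬ (decide (prev ≥ x) = true)), hrec]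
      simp [resetIdxs, hc]
    · rw [if_pos (by simpa using by omega : decide (prev ≥ x) = true), hrec]
      simp [resetIdxs, hc]

-- segcat over the reference bounds produces the ranges = reference spans
lemma segcat_go :
    ∀ (rest : List Int) (prev s i : Int), s < i →
      segcat (s :: (resetIdxs prev i rest ++ [i + rest.length]))
        = PySem.List.pyRange 1 (i - s + 1) 1 ++ spanGo prev (i - s) rest := by
  intro rest
  induction rest with
  | nil =>
    intro prev s i hsi
    simp [resetIdxs, segcat, spanGo]
  | cons x xs ih =>
    intro prev s i hsi
    by_cases hc : prev < x
    · have h1 : resetIdxs prev i (x :: xs) = resetIdxs x (i + 1) xs := by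
        simp [resetIdxs, hc]
      have h2 := ih x s (i + 1) (by omega)
      have he : i + 1 - s = i - s + 1 := by omega
      rw [he] at h2
      rw [h1]
      have hlen : i + (x :: xs).length = (i + 1) + (xs.length : Int) := by
        simp; omega
      rw [hlen, h2]
      have hsplit : PySem.List.pyRange 1 (i - s + 1 + 1) 1
          = PySem.List.pyRange 1 (i - s + 1) 1 ++ [i - s + 1] := by
        rw [PySem.List.pyRange_one_succ_right (by omega)]
      rw [hsplit]
      simp [spanGo, hc]
    · have h1 : resetIdxs prev i (x :: xs) = i :: resetIdxs x (i + 1) xs := by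
        simp [resetIdxs, hc]
      have h2 := ih x i (i + 1) (by omega)
      rw [h1]
      have hlen : i + (x :: xs).length = (i + 1) + (xs.length : Int) := by
        simp; omega
      show segcat (s :: i :: (resetIdxs x (i + 1) xs ++ [i + (x :: xs).length])) = _
      rw [segcat]
      rw [hlen, h2]
      have : i + 1 - i = 1 := by omega
      rw [this]
      have hr1 : PySem.List.pyRange 1 (1 + 1) 1 = [1] := by decide
      rw [hr1]
      simp [spanGo, hc]

lemma B_eq (x : Int) (xs : List Int) :
    findspanopt_alt (x :: xs) = 1 :: spanGo x 1 xs := by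
  unfold findspanopt_alt
  dsimp only
  have h0lt : (0 : Int) < ((x :: xs).length : Int) := by simp
  rw [PySem.List.pyRange_one_cons h0lt, List.filter_cons]
  have h0 : isStart (x :: xs) 0 = true := by unfold isStart; simp
  rw [if_pos h0]
  have hs := starts_go (x :: xs) xs [x] x rfl (by simp)
  norm_num at hs ⊢
  rw [hs]
  have hgo := segcat_go xs x 0 1 (by omega)
  norm_num at hgo
  have hr1 : PySem.List.pyRange 1 2 1 = [1] := by decide
  rw [hr1] at hgo
  have hcomm : (1 : Int) + (xs.length : Int) = (xs.length : Int) + 1 := by omega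
  rw [hcomm] at hgo
  rw [hgo]
  simp

-- ===== VERDICT (by name: the statement is the Claim_ definition above) =====
theorem findspanopt_spec : Claim_equal_findspanopt := by
  intro entries _
  unfold Spec_findspanopt
  cases entries with
  | nil => rfl
  | cons x xs => rw [A_eq, B_eq]
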